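-- pv_equiv track=rewrite | github.com/havu73/pwlr | regression/fixedX_pwlr.py | find_increase_ranges
-- ===== SOURCE A (Python) =====
-- def find_increase_ranges(tensor):
--     '''
--     Given a tensor of size (N,), find ranges within the tensor where the values are increasing instead of decreasing
--     This function is used to find, in py, if there are ranges of Y that we need to filter out
--     :param tensor:
--     :return:
--     '''
--     # Initialize an empty list to store the ranges
--     ranges = []
--     # Traverse the tensor to find ranges where the values decrease and then increase
--     start = None
--     end = None
--     downhill=True
--     for i in range(1, len(tensor)):
--         if (tensor[i] > tensor[i - 1]) and downhill:  # the sequence start to increase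
--             downhill=False
--             start = tensor[i - 1]
--         elif (tensor[i] > tensor[i - 1]) and not downhill:  # it keeps increasing
--             pass
--         elif (tensor[i] <= tensor[i - 1]) and not downhill:  # the sequence start to decrease
--             end = tensor[i - 1]
--             ranges.append((start, end))
--             downhill=True
--         else: # tensor[i] <= tensor[i - 1] and downhill=True --> keep decreasing, let it be
--             pass
--     # we have reached the end of the tensor
--     if not downhill: # we are going uphill and reach the end of the tensor
--         end = tensor[-1]
--         ranges.append((start, end))
--     else: # we are going downhill, which means the uphill past has been recorded
--         pass
--     return ranges
-- ===== SOURCE B (Python) =====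
-- def find_increase_ranges(tensor):
--     # Two-pointer scan over maximal strictly-increasing chunks: for each chunk
--     # tensor[i:j] of length > 1, report (tensor[i], tensor[j-1]).
--     out = []
--     n = len(tensor)
--     i = 0
--     while i < n:
--         j = i + 1
--         while j < n and tensor[j] > tensor[j - 1]:
--             j += 1
--         if j - i > 1:
--             out.append((tensor[i], tensor[j - 1]))
--         i = j
--     return out
-- ===== Notes on version B (the rewrite author's own statement) =====
-- stated objective: alternative
-- what changed: Replaces A's stateful downhill/uphill flag machine (with start/end bookkeeping and a post-loop fixup) by a stateless two-pointer scan over maximal strictly-increasing chunks, emitting (first, last) of each chunk of length > 1.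
import Mathlib
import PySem

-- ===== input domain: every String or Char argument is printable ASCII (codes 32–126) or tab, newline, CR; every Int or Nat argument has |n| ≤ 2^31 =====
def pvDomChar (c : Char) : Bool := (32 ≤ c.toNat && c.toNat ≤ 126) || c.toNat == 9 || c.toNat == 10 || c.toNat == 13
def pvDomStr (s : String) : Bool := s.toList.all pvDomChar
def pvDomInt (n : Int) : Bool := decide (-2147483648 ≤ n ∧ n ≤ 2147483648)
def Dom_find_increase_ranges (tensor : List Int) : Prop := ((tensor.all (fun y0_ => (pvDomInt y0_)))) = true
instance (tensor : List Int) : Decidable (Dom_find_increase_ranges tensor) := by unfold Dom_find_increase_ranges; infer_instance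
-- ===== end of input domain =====

-- B replaces A's downhill/uphill state machine by splitting the tensor into maximal
-- strictly-increasing chunks and emitting (first, last) of each chunk of length > 1 (objective: alternative).

-- ===== PORT A =====
-- the for-loop of A: state (ranges, start, downhill), iterating over consecutive pairs
-- (prev = tensor[i-1], x = tensor[i]); branches in A's order.
def loopA : Int → List (Int × Int) → Option Int → Bool → List Int → List (Int × Int) × Option Int × Bool
  | _, ranges, start, downhill, [] => (ranges, start, downhill)
  | prev, ranges, start, downhill, x :: rest =>
    if decide (x > prev) && downhill then
      loopA x ranges (some prev) false rest
    else if decide (x > prev) && !downhill then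
      loopA x ranges start downhill rest
    else if decide (x ≤ prev) && !downhill then
      loopA x (ranges ++ [(start.getD 0, prev)]) start true rest
    else
      loopA x ranges start downhill rest

def find_increase_ranges (tensor : List Int) : List (Int × Int) :=
  match tensor with
  | [] => []  -- loop body never runs, downhill stays True, ranges stays []
  | t0 :: rest =>
    match loopA t0 [] none true rest with
    | (ranges, start, downhill) =>
      if !downhill then
        ranges ++ [(start.getD 0, ((PySem.List.pyGet? tensor (-1)).getD 0))]  -- tensor[-1]
      else
        ranges

-- ===== PORT B =====
-- Source B's inner while loop: collect the maximal strictly-increasing run after prev; return (run, rest)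
def takeRun : Int → List Int → List Int × List Int
  | _, [] => ([], [])
  | p, x :: r =>
    if decide (x > p) then
      let pr := takeRun x r
      (x :: pr.1, pr.2)
    else
      ([], x :: r)

theorem takeRun_snd_length (p : Int) (r : List Int) : (takeRun p r).2.length ≤ r.length := by
  induction r generalizing p with
  | nil => simp [takeRun]
  | cons x r ih =>
    simp only [takeRun]
    split
    · exact le_trans (ih x) (Nat.le_succ _)
    · simp

-- Source B's outer while loop: process one maximal increasing chunk, emit its pair if length > 1, continue on the rest
def chunkLoop (xs : List Int) : List (Int × Int) :=
  match xs with
  | [] => []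
  | x :: r =>
    let pr := takeRun x r
    (if 0 < pr.1.length then [(x, ((x :: pr.1).getLastD 0))] else []) ++ chunkLoop pr.2
termination_by xs.length
decreasing_by
  simpa using Nat.lt_succ_of_le (takeRun_snd_length x r)

def find_increase_ranges_alt (tensor : List Int) : List (Int × Int) :=
  chunkLoop tensor

-- ===== PRECONDITION & SPEC =====
def Spec_find_increase_ranges (tensor : List Int) (out : List (Int × Int)) : Prop := out = find_increase_ranges_alt tensor
instance (tensor : List Int) (out : List (Int × Int)) : Decidable (Spec_find_increase_ranges tensor out) := by unfold Spec_find_increase_ranges; infer_instance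

-- ===== CLAIM (what is proved, stated in full; the proofs are below) =====
def Claim_equal_find_increase_ranges : Prop := ∀ (tensor : List Int), Dom_find_increase_ranges tensor → Spec_find_increase_ranges tensor (find_increase_ranges tensor)

-- ===== LEMMAS AND PROOFS =====

-- Reference state machine: fDown = going downhill after prev p; gUp = going uphill, run started at s, last seen p.
mutual
  def fDown : Int → List Int → List (Int × Int)
    | _, [] => []
    | p, x :: r => if x > p then gUp p x r else fDown x r
  def gUp : Int → Int → List Int → List (Int × Int)
    | s, p, [] => [(s, p)]
    | s, p, x :: r => if x > p then gUp s x r else (s, p) :: fDown x r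
end

def fChain : List Int → List (Int × Int)
  | [] => []
  | x :: r => fDown x r

def finishA (L : Int) : List (Int × Int) × Option Int × Bool → List (Int × Int)
  | (ranges, start, downhill) => if downhill then ranges else ranges ++ [(start.getD 0, L)]

-- A-side characterisation
def lastOf (p : Int) (r : List Int) : Int := (p :: r).getLastD 0

theorem lastOf_cons (p x : Int) (r : List Int) : lastOf p (x :: r) = lastOf x r := by
  simp [lastOf, List.getLastD]

theorem loopA_char (r : List Int) :
    (∀ (s prev : Int) (ranges : List (Int × Int)),
      finishA (lastOf prev r) (loopA prev ranges (some s) false r) = ranges ++ gUp s prev r) ∧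
    (∀ (prev : Int) (ranges : List (Int × Int)) (start : Option Int),
      finishA (lastOf prev r) (loopA prev ranges start true r) = ranges ++ fDown prev r) := by
  induction r with
  | nil =>
    constructor
    · intro s prev ranges
      simp [loopA, finishA, gUp, lastOf]
    · intro prev ranges start
      simp [loopA, finishA, fDown]
  | cons x r ih =>
    constructor
    · intro s prev ranges
      by_cases h : x > prev
      · simp [loopA, h, gUp]
        rw [lastOf_cons]
        exact ih.1 s x ranges
      · have h' : x ≤ prev := le_of_not_gt h
        simp [loopA, gUp, h, h']
        rw [lastOf_cons]
        have := ih.2 x (ranges ++ [(s, prev)]) (some s)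
        simpa using this
    · intro prev ranges start
      by_cases h : x > prev
      · simp [loopA, fDown, h]
        rw [lastOf_cons]
        exact ih.1 prev x ranges
      · have h' : x ≤ prev := le_of_not_gt h
        simp [loopA, fDown, h, h']
        rw [lastOf_cons]
        exact ih.2 x ranges start

theorem pyGetLast (t0 : Int) (rest : List Int) :
    (PySem.List.pyGet? (t0 :: rest) (-1)).getD 0 = lastOf t0 rest := by
  rw [PySem.List.pyGet?_neg_one]
  simp [lastOf, List.getLastD_eq_getLast?]

theorem A_eq_fChain (tensor : List Int) : find_increase_ranges tensor = fChain tensor := by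
  cases tensor with
  | nil => rfl
  | cons t0 rest =>
    have h := (loopA_char rest).2 t0 [] none
    rcases hst : loopA t0 [] none true rest with ⟨ranges, start, dh⟩
    rw [hst] at h
    simp only [fChain, find_increase_ranges, hst, pyGetLast t0 rest]
    cases dh with
    | true => simp only [finishA, List.nil_append] at h; simpa using h
    | false => simp only [finishA] at h; simpa using h

-- B-side characterisation
theorem gUp_takeRun (r : List Int) : ∀ (s p : Int),
    gUp s p r = (s, ((p :: (takeRun p r).1).getLastD 0)) :: fChain (takeRun p r).2 := by
  induction r with
  | nil => intro s p; simp [gUp, takeRun, fChain]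
  | cons x r ih =>
    intro s p
    by_cases h : x > p
    · simp only [gUp, takeRun, h, decide_true, if_true]
      rw [ih s x]
      simp [List.getLastD]
    · simp only [gUp, takeRun, h, decide_false, if_false]
      simp [fChain]

theorem chunkLoop_eq_fChain_aux : ∀ (n : Nat) (xs : List Int), xs.length ≤ n → chunkLoop xs = fChain xs := by
  intro n
  induction n with
  | zero =>
    intro xs h
    have hxs : xs = [] := List.eq_nil_of_length_eq_zero (Nat.le_zero.mp h)
    subst hxs
    simp [chunkLoop, fChain]
  | succ n ih =>
    intro xs h
    match xs with
    | [] => simp [chunkLoop, fChain]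
    | [x] => simp [chunkLoop, takeRun, fChain, fDown]
    | x :: y :: r2 =>
      by_cases hxy : y > x
      · have hlen : (takeRun y r2).2.length ≤ n := by
          have := takeRun_snd_length y r2
          simp at h; omega
        simp only [chunkLoop, takeRun, hxy, decide_true, if_true]
        rw [ih _ hlen]
        have hrun : 0 < (y :: (takeRun y r2).1).length := by simp
        rw [if_pos hrun]
        have hgl : ((x :: y :: (takeRun y r2).1).getLastD 0)
            = ((y :: (takeRun y r2).1).getLastD 0) := by simp [List.getLastD]
        simp only [fChain, fDown, if_pos hxy, gUp_takeRun r2 x y, hgl]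
        simp
      · have hlen : (y :: r2).length ≤ n := by simp at h ⊢; omega
        have hstep : chunkLoop (x :: y :: r2) = chunkLoop (y :: r2) := by
          conv_lhs => rw [chunkLoop]
          simp [takeRun, hxy]
        rw [hstep, ih _ hlen]
        simp [fChain, fDown, hxy]

theorem chunkLoop_eq_fChain (xs : List Int) : chunkLoop xs = fChain xs :=
  chunkLoop_eq_fChain_aux xs.length xs le_rfl

-- ===== VERDICT (by name: the statement is the Claim_ definition above) =====
theorem find_increase_ranges_spec : Claim_equal_find_increase_ranges := by
  intro tensor _
  unfold Spec_find_increase_ranges find_increase_ranges_alt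
  rw [A_eq_fChain tensor, chunkLoop_eq_fChain tensor]
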